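-- pv_equiv track=rewrite | github.com/tnakaicode/jburkardt-python | bvec/bvec.py | i4_btest
-- ===== SOURCE A (Python) =====
-- def i4_btest ( i4, pos ):
--
-- #*****************************************************************************80
-- #
-- ## i4_btest() returns TRUE if the POS-th bit of an I4 is 1.
-- #
-- #  Licensing:
-- #
-- #    This code is distributed under the MIT license.
-- #
-- #  Modified:
-- #
-- #    15 June 2015
-- #
-- #  Author:
-- #
-- #    John Burkardt
-- #
-- #  Reference:
-- #
-- #    Military Standard 1753,
-- #    FORTRAN, DoD Supplement To American National Standard X3.9-1978,
-- #    9 November 1978.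
-- #
-- #  Input:
-- #
-- #    integer I4, the integer to be tested.
-- #
-- #    integer POS, the bit position, between 0 and 31.
-- #
-- #  Output:
-- #
-- #    logical VALUE, is TRUE if the POS-th bit of I4 is 1.
-- #
--   i4_huge = 2147483647
--
--   if ( pos < 0 ):
--
--     print ( '' )
--     print ( 'i4_btest(): Fatal error!' )
--     print ( '  POS < 0.' )
--     raise Exception ( 'i4_btest(): Fatal error!' )
--
--   elif ( pos < 31 ):
--
--     if ( 0 <= i4 ):
--       j = i4
--     else:
--       j = ( i4_huge + i4 ) + 1
--
--     for k in range ( 0, pos ):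
--       j = ( j // 2 )
--
--     if ( ( j % 2 ) == 0 ):
--       value = False
--     else:
--       value = True
--
--   elif ( pos == 31 ):
--
--     if ( i4 < 0 ):
--       value = True
--     else:
--       value = False
--
--   elif ( 31 < pos ):
--
--     print ( '' )
--     print ( 'i4_btest - Fatal error!' )
--     print ( '  31 < POS.' )
--     raise Exception ( 'i4_btest - Fatal error!' )
--
--   return value
-- ===== SOURCE B (Python) =====
-- def i4_btest ( i4, pos ):
--   if ( pos < 0 ):
--     print ( '' )
--     print ( 'i4_btest(): Fatal error!' )
--     print ( '  POS < 0.' )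
--     raise Exception ( 'i4_btest(): Fatal error!' )
--   if ( 31 < pos ):
--     print ( '' )
--     print ( 'i4_btest - Fatal error!' )
--     print ( '  31 < POS.' )
--     raise Exception ( 'i4_btest - Fatal error!' )
--   return ( ( i4 >> pos ) & 1 ) == 1
-- ===== Notes on version B (the rewrite author's own statement) =====
-- stated objective: simpler
-- what changed: Drops the sign-conversion to an unsigned j, the pos-step halving loop and the pos==31 special case, replacing them all by one arithmetic-shift bit test ((i4 >> pos) & 1) == 1 on the signed value.
-- intended difference: For i4 >= 2**31 (not a representable I4) with pos = 31, A returns False from its sign test while B returns True, the actual 31st bit of the integer; treating the argument uniformly as an integer is the intended reading on this out-of-range input. — e.g. on i4_btest(2147483648, 31): A returns false, B returns true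
import Mathlib
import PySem

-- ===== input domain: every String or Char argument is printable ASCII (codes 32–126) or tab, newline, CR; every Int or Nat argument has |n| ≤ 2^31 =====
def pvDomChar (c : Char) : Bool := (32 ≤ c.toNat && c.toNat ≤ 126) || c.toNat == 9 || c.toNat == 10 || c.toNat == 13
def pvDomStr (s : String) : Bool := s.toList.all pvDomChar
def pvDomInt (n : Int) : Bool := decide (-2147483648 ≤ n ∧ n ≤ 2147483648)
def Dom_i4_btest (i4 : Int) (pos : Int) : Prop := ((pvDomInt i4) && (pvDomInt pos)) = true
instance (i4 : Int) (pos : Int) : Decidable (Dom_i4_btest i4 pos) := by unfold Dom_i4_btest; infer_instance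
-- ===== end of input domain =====

-- B drops the unsigned conversion, the pos-step halving loop and the pos==31 special case, using one arithmetic-shift bit test on the signed value (simpler).

-- ===== PORT A =====
def i4_btest (i4 : Int) (pos : Int) : Bool :=
  let i4_huge : Int := 2147483647
  if pos < 0 then
    false  -- Python raises Exception here; excluded by Pre_
  else if pos < 31 then
    let j : Int := if 0 ≤ i4 then i4 else (i4_huge + i4) + 1
    let j : Int := (PySem.List.pyRange 0 pos 1).foldl (fun x _ => PySem.Int.floordiv x 2) j
    if PySem.Int.mod j 2 == 0 then false else true
  else if pos == 31 then
    if i4 < 0 then true else false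
  else
    false  -- Python raises Exception here; excluded by Pre_

-- ===== PORT B =====
def i4_btest_alt (i4 : Int) (pos : Int) : Bool :=
  if pos < 0 then
    false  -- Python raises Exception here; excluded by Pre_
  else if 31 < pos then
    false  -- Python raises Exception here; excluded by Pre_
  else
    (PySem.Int.band (i4 >>> pos.toNat) 1) == 1   -- ((i4 >> pos) & 1) == 1; Lean's >>> on Int is Python's >>

-- ===== PRECONDITION & SPEC =====
-- A raises Exception (after printing a fatal-error message) when pos < 0 or 31 < pos; only those inputs are excluded.
def Pre_i4_btest (i4 : Int) (pos : Int) : Prop := 0 ≤ pos ∧ pos ≤ 31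
instance (i4 : Int) (pos : Int) : Decidable (Pre_i4_btest i4 pos) := by unfold Pre_i4_btest; infer_instance
def pvWitness_i4_btest : Int × Int := (5, 2)

-- For i4 ≥ 2^31 (not a representable I4) with pos = 31, A returns false from its sign test while B
-- returns true, the actual 31st bit of the integer; the uniform bit test is the intended reading there.
def D_i4_btest (i4 : Int) (pos : Int) : Prop := 2147483648 ≤ i4 ∧ pos = 31
instance (i4 : Int) (pos : Int) : Decidable (D_i4_btest i4 pos) := by unfold D_i4_btest; infer_instance

def Spec_i4_btest (i4 : Int) (pos : Int) (out : Bool) : Prop := ¬ D_i4_btest i4 pos → out = i4_btest_alt i4 pos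
instance (i4 : Int) (pos : Int) (out : Bool) : Decidable (Spec_i4_btest i4 pos out) := by unfold Spec_i4_btest; infer_instance

def pvDiffWitness_i4_btest : Int × Int := (2147483648, 31)
def pvDiffWitnessOut_i4_btest : Bool × Bool := (false, true)

-- ===== CLAIM (what is proved, stated in full; the proofs are below) =====
def Claim_unchanged_i4_btest : Prop := ∀ (i4 : Int) (pos : Int), Dom_i4_btest i4 pos → Pre_i4_btest i4 pos → Spec_i4_btest i4 pos (i4_btest i4 pos)
def Claim_changed_i4_btest : Prop := Dom_i4_btest (pvDiffWitness_i4_btest.1) (pvDiffWitness_i4_btest.2) ∧ Pre_i4_btest (pvDiffWitness_i4_btest.1) (pvDiffWitness_i4_btest.2) ∧ D_i4_btest (pvDiffWitness_i4_btest.1) (pvDiffWitness_i4_btest.2) ∧ i4_btest (pvDiffWitness_i4_btest.1) (pvDiffWitness_i4_btest.2) = pvDiffWitnessOut_i4_btest.1 ∧ i4_btest_alt (pvDiffWitness_i4_btest.1) (pvDiffWitness_i4_btest.2) = pvDiffWitnessOut_i4_btest.2 ∧ pvDiffWitnessOut_i4_btest.1 ≠ pvDiffWitnessOut_i4_btest.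2
def Claim_exact_i4_btest : Prop := ∀ (i4 : Int) (pos : Int), Dom_i4_btest i4 pos → Pre_i4_btest i4 pos → D_i4_btest i4 pos → i4_btest i4 pos ≠ i4_btest_alt i4 pos

-- ===== LEMMAS AND PROOFS =====

-- A's halving loop over range(0, pos) computes floor division by 2^pos.
theorem foldl_halve_pyRange (p : Nat) (j : Int) :
    (PySem.List.pyRange 0 (p : Int) 1).foldl (fun x _ => PySem.Int.floordiv x 2) j
      = j / 2 ^ p := by
  induction p generalizing j with
  | zero => simp [PySem.List.pyRange_one_eq_nil]
  | succ n ih =>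
    rw [show ((n + 1 : Nat) : Int) = (n : Int) + 1 by push_cast; ring,
        PySem.List.pyRange_one_succ_right (by positivity), List.foldl_append]
    simp only [List.foldl_cons, List.foldl_nil, ih]
    rw [PySem.Int.floordiv_eq_ediv_of_pos (by norm_num),
        Int.ediv_ediv_of_nonneg (by positivity)]
    ring_nf

-- Adding 2^31 leaves bits 0..30 unchanged.
theorem bit_shift_add (p : Nat) (hp : p ≤ 30) (i4 : Int) :
    ((i4 + 2147483648) / 2 ^ p) % 2 = (i4 / 2 ^ p) % 2 := by
  have h : (2 : Int) * 2 ^ (30 - p) * 2 ^ p = 2147483648 := by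
    rw [show (2 : Int) * 2 ^ (30 - p) * 2 ^ p = 2 ^ (1 + (30 - p) + p) by
          rw [pow_add, pow_add, pow_one],
        show 1 + (30 - p) + p = 31 by omega]
    norm_num
  rw [← h, Int.add_mul_ediv_right _ _ (by positivity : (0:Int) < 2 ^ p).ne',
      Int.add_mul_emod_self_left]

-- ===== VERDICT (by name: the statement is the Claim_ definition above) =====
theorem i4_btest_spec : Claim_unchanged_i4_btest := by
  intro i4 pos hdom hpre hnd
  obtain ⟨h0, h31⟩ := hpre
  have hdom' : -2147483648 ≤ i4 ∧ i4 ≤ 2147483648 := by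
    simp [Dom_i4_btest, pvDomInt] at hdom; exact hdom.1
  simp only [i4_btest, i4_btest_alt,
    if_neg (show ¬ pos < 0 by omega), if_neg (show ¬ 31 < pos by omega),
    PySem.Int.band_one]
  by_cases hlt : pos < 31
  · rw [if_pos hlt]
    set j : Int := if 0 ≤ i4 then i4 else (2147483647 : Int) + i4 + 1 with hj
    have hcast : pos = ((pos.toNat : Nat) : Int) := by omega
    rw [hcast, foldl_halve_pyRange pos.toNat j, Int.shiftRight_eq_div_pow]
    have hjj : j / 2 ^ pos.toNat % 2 = i4 / 2 ^ pos.toNat % 2 := by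
      rw [hj]; split_ifs with hnn
      · rfl
      · rw [show (2147483647 : Int) + i4 + 1 = i4 + 2147483648 by ring]
        exact bit_shift_add pos.toNat (by omega) i4
    rw [PySem.Int.mod_eq_emod_of_pos (by norm_num),
        PySem.Int.mod_eq_emod_of_pos (by norm_num), hjj]
    have hmx : (max pos 0).toNat = pos.toNat := by omega
    rcases Int.emod_two_eq (i4 / 2 ^ pos.toNat) with h | h <;>
      simp [h, hmx]
  · have h31e : pos = 31 := by omega
    subst h31e
    have hnd' : i4 < 2147483648 := by
      by_contra hc; exact hnd ⟨by omega, rfl⟩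
    rw [if_neg (lt_irrefl (31 : Int)),
        if_pos (show ((31 : Int) == 31) = true by decide), Int.shiftRight_eq_div_pow,
        PySem.Int.mod_eq_emod_of_pos (by norm_num)]
    have h2 : (((2 : Nat) ^ (31 : Int).toNat : Nat) : Int) = 2147483648 := by decide
    rw [h2]
    have : i4 / 2147483648 % 2 = if i4 < 0 then 1 else 0 := by
      split_ifs with hneg
      · have : i4 / 2147483648 = -1 := by omega
        rw [this]; decide
      · have : i4 / 2147483648 = 0 := by omega
        rw [this]; decide
    rw [this]
    by_cases hneg : i4 < 0 <;> simp [hneg]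

theorem i4_btest_changed : Claim_changed_i4_btest := by
  unfold Claim_changed_i4_btest; decide

theorem i4_btest_tight : Claim_exact_i4_btest := by
  intro i4 pos hdom _ hd
  have hdom' : i4 ≤ 2147483648 := by
    simp [Dom_i4_btest, pvDomInt] at hdom; exact hdom.1.2
  obtain ⟨hi, hp⟩ := hd
  have hi4 : i4 = 2147483648 := by omega
  subst hi4; subst hp; decide
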